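-- pv_equiv track=rewrite | github.com/tuenguyenprograming1003/Game-8Rocks | Alg/dfs.py | dfs_target
-- ===== SOURCE A (Python) =====
-- n = 8
--
-- def dfs_target(tg):
--     tg_t = tuple(tg)
--     start = tuple()
--     stack = [start]
--     par = {start: None}
--     while stack:
--         st = stack.pop()
--         if len(st) == n:
--             if st == tg_t:
--                 break
--             else:
--                 continue
--         for c in range(n):
--             if c in st: continue
--             ns = tuple(list(st)+[c])
--             if ns not in par:
--                 par[ns] = st
--                 stack.append(ns)
--                 if ns == tg_t:
--                     stack.clear()
--                     break
--     if tg_t not in par: return []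
--     path = []
--     cur = tg_t
--     while cur is not None:
--         s = [None]*n
--         for i,v in enumerate(cur): s[i]=v
--         path.append(s)
--         cur = par.get(cur)
--     return path[::-1]
-- ===== SOURCE B (Python) =====
-- def dfs_target(tg):
--     n = 8
--     # A state is reachable iff tg is a duplicate-free sequence of values in 0..n-1;
--     # the DFS parent chain of tg is then exactly its chain of prefixes.
--     if len(set(tg)) != len(tg) or not all(0 <= v < n for v in tg):
--         return []
--     return [[tg[i] if i < k else None for i in range(n)]
--             for k in range(len(tg) + 1)]
-- ===== Notes on version B (the rewrite author's own statement) =====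
-- stated objective: faster
-- what changed: Replaces the exhaustive DFS over all ~110000 partial permutations (with a parent dict and backtrace) by a direct validity check (tg must be duplicate-free with values in 0..7) followed by closed-form construction of the None-padded prefixes of tg, which is exactly the DFS parent chain.
import Mathlib
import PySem

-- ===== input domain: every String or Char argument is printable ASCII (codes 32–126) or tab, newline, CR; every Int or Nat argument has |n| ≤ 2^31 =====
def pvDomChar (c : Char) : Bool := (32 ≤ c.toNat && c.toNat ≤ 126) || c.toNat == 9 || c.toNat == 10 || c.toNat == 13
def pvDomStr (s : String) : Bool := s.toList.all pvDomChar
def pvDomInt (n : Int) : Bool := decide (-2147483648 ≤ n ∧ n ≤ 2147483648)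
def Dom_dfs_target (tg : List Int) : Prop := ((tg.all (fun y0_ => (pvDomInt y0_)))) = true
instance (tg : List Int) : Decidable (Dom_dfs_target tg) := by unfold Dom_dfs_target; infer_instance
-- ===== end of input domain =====

-- B replaces A's exhaustive DFS over all partial permutations by a validity check plus a
-- closed-form construction of the None-padded prefixes of tg (objective: faster).

-- ===== PORT A =====
-- A's dict 'par' is used ONLY via membership / get / insert (its iteration order is never
-- observed), so it is ported as Std.HashMap, which has exactly the Python dict's behaviour
-- on these operations; the while-loops are ported with a fuel counter that is proved (below)
-- never to run out (the state space has fewer than 9^8 states, and each iteration pops one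
-- stack entry).

-- inner 'for c in range(n)' body of the search loop (with its 'continue's and the
-- 'stack.clear(); break' early exit)
def pvExpand (tg st : List Int) (cs : List Int) (stack : List (List Int))
    (par : Std.HashMap (List Int) (Option (List Int))) :
    List (List Int) × Std.HashMap (List Int) (Option (List Int)) :=
  match cs with
  | [] => (stack, par)
  | c :: rest =>
    if c ∈ st then pvExpand tg st rest stack par            -- if c in st: continue
    -- ns = tuple(list(st)+[c]); if ns not in par: par[ns] = st; stack.append(ns); …
    else if (st ++ [c]) ∈ par then pvExpand tg st rest stack par
    -- if ns == tg_t: stack.clear(); break  (the cleared stack makes the push invisible,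
    -- so this branch returns ([], par with ns inserted) directly)
    else if (st ++ [c]) = tg then ([], par.insert (st ++ [c]) (some st))
    else pvExpand tg st rest ((st ++ [c]) :: stack) (par.insert (st ++ [c]) (some st))

-- 'while stack:' search loop (stack top = list head)
def pvLoop (tg : List Int) (fuel : Nat) (stack : List (List Int))
    (par : Std.HashMap (List Int) (Option (List Int))) :
    Std.HashMap (List Int) (Option (List Int)) :=
  match fuel with
  | 0 => par
  | fuel + 1 =>
    match stack with
    | [] => par
    | st :: rest =>
      if st.length = 8 then
        if st = tg then par else pvLoop tg fuel rest par
      else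
        pvLoop tg fuel (pvExpand tg st (PySem.List.pyRange 0 8 1) rest par).1
          (pvExpand tg st (PySem.List.pyRange 0 8 1) rest par).2

-- 'while cur is not None:' reconstruction loop; 's = [None]*n; for i,v in enumerate(cur): s[i]=v'
-- is the map-and-pad expression (exact whenever len(cur) ≤ n = 8, which holds for every dict
-- key; Python would raise IndexError beyond that, which is unreachable).  The fuel
-- tg.length + 2 covers the parent chain tg, tg[:-1], …, (), None.
def pvBuild (par : Std.HashMap (List Int) (Option (List Int))) (fuel : Nat)
    (cur : Option (List Int)) (acc : List (List (Option Int))) : List (List (Option Int)) :=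
  match fuel, cur with
  | _, none => acc
  | 0, _ => acc
  | fuel + 1, some c =>
    pvBuild par fuel ((par.get? c).join)
      (acc ++ [c.map some ++ List.replicate (8 - c.length) none])  -- path.append(s); cur = par.get(cur)

def dfs_target (tg : List Int) : List (List (Option Int)) :=
  let par := pvLoop tg 50000000 [[]] ((Std.HashMap.emptyWithCapacity).insert [] none)
  if (par.get? tg).isNone then []                      -- if tg_t not in par: return []
  else (pvBuild par (tg.length + 2) (some tg) []).reverse   -- return path[::-1]

-- ===== PORT B =====
def dfs_target_alt (tg : List Int) : List (List (Option Int)) :=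
  -- if len(set(tg)) != len(tg) or not all(0 <= v < n for v in tg): return []
  if (PySem.Set.ofList tg).length ≠ tg.length ∨ ¬ (∀ v ∈ tg, 0 ≤ v ∧ v < 8) then []
  else
    -- [[tg[i] if i < k else None for i in range(n)] for k in range(len(tg)+1)]
    -- (nonnegative ranges ported as List.range; tg[i] with 0 ≤ i < k ≤ len(tg) as tg[i]?)
    (List.range (tg.length + 1)).map (fun k =>
      (List.range 8).map (fun i => if i < k then tg[i]? else none))

-- ===== PRECONDITION & SPEC =====
def Spec_dfs_target (tg : List Int) (out : List (List (Option Int))) : Prop := out = dfs_target_alt tg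
instance (tg : List Int) (out : List (List (Option Int))) : Decidable (Spec_dfs_target tg out) := by unfold Spec_dfs_target; infer_instance

-- ===== CLAIM (what is proved, stated in full; the proofs are below) =====
def Claim_equal_dfs_target : Prop := ∀ (tg : List Int), Dom_dfs_target tg → Spec_dfs_target tg (dfs_target tg)

-- ===== LEMMAS AND PROOFS =====

-- a reachable DFS state: a duplicate-free list of values in 0..7
def pvGood (l : List Int) : Prop := l.Nodup ∧ ∀ x ∈ l, 0 ≤ x ∧ x < 8

theorem pvGood_length_le (l : List Int) (h : pvGood l) : l.length ≤ 8 := by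
  have hsub : l.toFinset ⊆ Finset.Icc (0 : ℤ) 7 := by
    intro x hx
    rcases h.2 x (List.mem_toFinset.mp hx) with ⟨h0, h1⟩
    simp [Finset.mem_Icc]; omega
  have hcard := Finset.card_le_card hsub
  rw [List.toFinset_card_of_nodup h.1] at hcard
  simpa using hcard

-- base-9 encoding: injective on in-range lists, < 9^length
def pvEnc : List Int → Nat
  | [] => 0
  | d :: t => (d.toNat + 1) + 9 * pvEnc t

theorem pvEnc_lt (l : List Int) (h : ∀ x ∈ l, 0 ≤ x ∧ x < 8) : pvEnc l < 9 ^ l.length := by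
  induction l with
  | nil => simp [pvEnc]
  | cons d t ih =>
    have hd := h d (by simp)
    have ht := ih (fun x hx => h x (by simp [hx]))
    have : d.toNat + 1 ≤ 8 := by omega
    simp only [pvEnc, List.length_cons, pow_succ]
    omega

theorem pvEnc_inj (l1 : List Int) : ∀ l2 : List Int, (∀ x ∈ l1, 0 ≤ x ∧ x < 8) →
    (∀ x ∈ l2, 0 ≤ x ∧ x < 8) → pvEnc l1 = pvEnc l2 → l1 = l2 := by
  induction l1 with
  | nil =>
    intro l2 _ h2 he
    cases l2 with
    | nil => rfl
    | cons d t => simp only [pvEnc] at he; omega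
  | cons d t ih =>
    intro l2 h1 h2 he
    cases l2 with
    | nil => simp only [pvEnc] at he; omega
    | cons d' t' =>
      have hd := h1 d (by simp)
      have hd' := h2 d' (by simp)
      have hdb : d.toNat + 1 ≤ 8 := by omega
      have hdb' : d'.toNat + 1 ≤ 8 := by omega
      simp only [pvEnc] at he
      have hdn : d.toNat = d'.toNat ∧ pvEnc t = pvEnc t' := by omega
      have hde : d = d' := by
        have := hdn.1
        omega
      have hte : t = t' := ih t' (fun x hx => h1 x (by simp [hx]))
        (fun x hx => h2 x (by simp [hx])) hdn.2
      rw [hde, hte]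

theorem pvNodup_keys (m : Std.HashMap (List Int) (Option (List Int))) : m.keys.Nodup := by
  have h := Std.HashMap.distinct_keys (m := m)
  refine List.Pairwise.imp ?_ h
  intro a b hab he
  rw [he] at hab; simp at hab

theorem pvSize_le (m : Std.HashMap (List Int) (Option (List Int)))
    (h : ∀ k ∈ m, pvGood k) : m.size ≤ 43046721 := by
  have hkeys : ∀ k ∈ m.keys, pvGood k := fun k hk => h k (Std.HashMap.mem_keys.mp hk)
  have hnd : (m.keys.map pvEnc).Nodup := by
    refine List.Nodup.map_on ?_ (pvNodup_keys m)
    intro a ha b hb he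
    exact pvEnc_inj a b (hkeys a ha).2 (hkeys b hb).2 he
  have hlt : ∀ x ∈ m.keys.map pvEnc, x < 43046721 := by
    intro x hx
    rcases List.mem_map.mp hx with ⟨k, hk, rfl⟩
    have h1 := pvEnc_lt k (hkeys k hk).2
    have h2 : (9 : ℕ) ^ k.length ≤ 9 ^ 8 :=
      Nat.pow_le_pow_right (by norm_num) (pvGood_length_le k (hkeys k hk))
    calc pvEnc k < 9 ^ k.length := h1
      _ ≤ 9 ^ 8 := h2
      _ = 43046721 := by norm_num
  have hsub : (m.keys.map pvEnc).toFinset ⊆ Finset.range 43046721 := by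
    intro x hx
    simp only [Finset.mem_range]
    exact hlt x (List.mem_toFinset.mp hx)
  have hcard := Finset.card_le_card hsub
  rw [List.toFinset_card_of_nodup hnd, Finset.card_range] at hcard
  calc m.size = m.keys.length := (Std.HashMap.length_keys).symm
    _ = (m.keys.map pvEnc).length := by simp
    _ ≤ 43046721 := hcard

-- the loop invariant at the head of 'while stack:'
structure PvInv (stack : List (List Int)) (m : Std.HashMap (List Int) (Option (List Int))) : Prop where
  snd : stack.Nodup
  mem : ∀ p ∈ stack, p ∈ m
  good : ∀ k ∈ m, pvGood k
  root : m.get? [] = some none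
  chain : ∀ k, k ∈ m → k ≠ [] → m.get? k = some (some k.dropLast) ∧ k.dropLast ∈ m
  fresh : ∀ k, k ∈ m → k ≠ [] → k.dropLast ∉ stack
  comp : ∀ s, pvGood s → ¬ s ∈ m → ∃ p ∈ stack, p <+: s

-- what survives to the end of the search
structure PvPost (m : Std.HashMap (List Int) (Option (List Int))) : Prop where
  good : ∀ k ∈ m, pvGood k
  root : m.get? [] = some none
  chain : ∀ k, k ∈ m → k ≠ [] → m.get? k = some (some k.dropLast) ∧ k.dropLast ∈ m

theorem pvPrefix_step (st s : List Int) (h : st <+: s) (hne : st ≠ s) :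
    ∃ c, (st ++ [c]) <+: s := by
  rcases h with ⟨t, rfl⟩
  cases t with
  | nil => simp at hne
  | cons c t' => exact ⟨c, t', by simp⟩

theorem pvGet?_insert (m : Std.HashMap (List Int) (Option (List Int))) (k a : List Int)
    (v : Option (List Int)) :
    (m.insert k v).get? a = if k = a then some v else m.get? a := by
  simp [Std.HashMap.get?_eq_getElem?, Std.HashMap.getElem?_insert]

theorem pvExpand_spec (tg st : List Int) (hstg : pvGood st) (hstl : st.length < 8) :
    ∀ (cs : List Int) (stack : List (List Int))
      (m : Std.HashMap (List Int) (Option (List Int))),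
    cs.Nodup → (∀ c ∈ cs, 0 ≤ c ∧ c < 8) →
    st ∈ m → st ∉ stack →
    stack.Nodup → (∀ p ∈ stack, p ∈ m) → (∀ k ∈ m, pvGood k) →
    m.get? [] = some none →
    (∀ k, k ∈ m → k ≠ [] → m.get? k = some (some k.dropLast) ∧ k.dropLast ∈ m) →
    (∀ k, k ∈ m → k ≠ [] → k.dropLast ∉ stack) →
    (∀ c ∈ cs, c ∉ st → ¬ (st ++ [c]) ∈ m) →
    (∀ s, pvGood s → ¬ s ∈ m →
      (∃ p ∈ stack, p <+: s) ∨ (∃ c ∈ cs, c ∉ st ∧ (st ++ [c]) <+: s)) →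
    PvPost (pvExpand tg st cs stack m).2 ∧
    (((pvExpand tg st cs stack m).1 = [] ∧ tg ∈ (pvExpand tg st cs stack m).2) ∨
     (PvInv (pvExpand tg st cs stack m).1 (pvExpand tg st cs stack m).2 ∧
      ∃ j, (pvExpand tg st cs stack m).1.length = stack.length + j ∧
           (pvExpand tg st cs stack m).2.size = m.size + j)) := by
  intro cs
  induction cs with
  | nil =>
    intro stack m _ _ hstm hstns hsnd hmem hgood hroot hchain hfresh _ hcomp
    simp only [pvExpand]
    refine ⟨⟨hgood, hroot, hchain⟩, Or.inr ⟨⟨hsnd, hmem, hgood, hroot, hchain, hfresh, ?_⟩, 0, by simp, by simp⟩⟩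
    intro s hs hsm
    rcases hcomp s hs hsm with h | ⟨c, hc, _⟩
    · exact h
    · simp at hc
  | cons c rest ih =>
    intro stack m hnd hbnd hstm hstns hsnd hmem hgood hroot hchain hfresh hfcs hcomp
    by_cases hcst : c ∈ st
    · -- 'if c in st: continue'
      rw [pvExpand, if_pos hcst]
      refine ih stack m (List.Nodup.of_cons hnd) (fun c' hc' => hbnd c' (by simp [hc']))
        hstm hstns hsnd hmem hgood hroot hchain hfresh
        (fun c' hc' => hfcs c' (by simp [hc'])) ?_
      intro s hs hsm
      rcases hcomp s hs hsm with h | ⟨c', hc', hc'st, hpre⟩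
      · exact Or.inl h
      · rcases List.mem_cons.mp hc' with rfl | hc'
        · exact absurd hcst hc'st
        · exact Or.inr ⟨c', hc', hc'st, hpre⟩
    · -- ns = st + [c] is fresh
      have hns : ¬ (st ++ [c]) ∈ m := hfcs c (by simp) hcst
      rw [pvExpand, if_neg hcst]
      simp only [if_neg hns]
      have hnsne : st ++ [c] ≠ [] := by simp
      have hnsgood : pvGood (st ++ [c]) := by
        constructor
        · exact (List.perm_append_singleton c st).nodup_iff.mpr (List.nodup_cons.mpr ⟨hcst, hstg.1⟩)
        · intro x hx
          rcases List.mem_append.mp hx with hx | hx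
          · exact hstg.2 x hx
          · have hxc : x = c := by simpa using hx
            rw [hxc]; exact hbnd c (by simp)
      have hdropns : (st ++ [c]).dropLast = st := by simp
      -- the new map m' = m.insert ns (some st)
      set m' := m.insert (st ++ [c]) (some st) with hm'
      have hmemm' : ∀ k, k ∈ m' → k = st ++ [c] ∨ k ∈ m := by
        intro k hk
        rcases (Std.HashMap.mem_insert).mp hk with h | h
        · exact Or.inl (beq_iff_eq.mp h).symm
        · exact Or.inr h
      have hmm' : ∀ k : List Int, k ∈ m → k ∈ m' := by
        intro k hk; exact Std.HashMap.mem_insert.mpr (Or.inr hk)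
      have hget' : ∀ k, k ∈ m → m'.get? k = m.get? k := by
        intro k hk
        rw [pvGet?_insert, if_neg]
        intro he; rw [← he] at hk; exact hns hk
      have hgood' : ∀ k ∈ m', pvGood k := by
        intro k hk
        rcases hmemm' k hk with rfl | hk
        · exact hnsgood
        · exact hgood k hk
      have hroot' : m'.get? [] = some none := by
        rw [pvGet?_insert, if_neg (by simp), hroot]
      have hchain' : ∀ k, k ∈ m' → k ≠ [] → m'.get? k = some (some k.dropLast) ∧ k.dropLast ∈ m' := by
        intro k hk hkne
        rcases hmemm' k hk with rfl | hk
        · rw [hdropns, pvGet?_insert, if_pos rfl]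
          exact ⟨rfl, hmm' st hstm⟩
        · rcases hchain k hk hkne with ⟨h1, h2⟩
          exact ⟨by rw [hget' k hk, h1], hmm' _ h2⟩
      by_cases htg : st ++ [c] = tg
      · -- found: stack.clear(); break
        rw [if_pos htg]
        refine ⟨⟨hgood', hroot', hchain'⟩, Or.inl ⟨rfl, ?_⟩⟩
        rw [← htg]
        exact Std.HashMap.mem_insert_self
      · rw [if_neg htg]
        have hnstack : st ++ [c] ∉ stack := fun h => hns (hmem _ h)
        have hres := ih ((st ++ [c]) :: stack) m'
          (List.Nodup.of_cons hnd) (fun c' hc' => hbnd c' (by simp [hc']))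
          (hmm' st hstm)
          (by
            intro h
            rcases List.mem_cons.mp h with he | h
            · exact (by simp : st ≠ st ++ [c]) he
            · exact hstns h)
          (List.nodup_cons.mpr ⟨hnstack, hsnd⟩)
          (by
            intro p hp
            rcases List.mem_cons.mp hp with rfl | hp
            · exact Std.HashMap.mem_insert_self
            · exact hmm' p (hmem p hp))
          hgood' hroot' hchain'
          (by
            -- freshness of parents against the grown stack
            intro k hk hkne
            rcases hmemm' k hk with rfl | hk
            · rw [hdropns]
              intro h
              rcases List.mem_cons.mp h with he | h
              · exact (by simp : st ≠ st ++ [c]) he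
              · exact hstns h
            · intro h
              rcases List.mem_cons.mp h with he | h
              · exact hns (by rw [← he]; exact (hchain k hk hkne).2)
              · exact hfresh k hk hkne h)
          (by
            intro c' hc' hc'st hmem'
            rcases hmemm' _ hmem' with he | h
            · have : c' = c := by
                have := List.append_inj_right he (by rfl)
                simpa using this
              exact (List.nodup_cons.mp hnd).1 (this ▸ hc')
            · exact hfcs c' (by simp [hc']) hc'st h)
          (by
            intro s hs hsm'
            have hsm : ¬ s ∈ m := fun h => hsm' (hmm' s h)
            rcases hcomp s hs hsm with ⟨p, hp, hpre⟩ | ⟨c', hc', hc'st, hpre⟩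
            · exact Or.inl ⟨p, by simp [hp], hpre⟩
            · rcases List.mem_cons.mp hc' with rfl | hc'
              · exact Or.inl ⟨st ++ [c'], by simp, hpre⟩
              · exact Or.inr ⟨c', hc', hc'st, hpre⟩)
        rcases hres with ⟨hpost, hcase⟩
        refine ⟨hpost, ?_⟩
        rcases hcase with h | ⟨hinv, j, hj1, hj2⟩
        · exact Or.inl h
        · refine Or.inr ⟨hinv, j + 1, ?_, ?_⟩
          · rw [hj1]; simp; omega
          · rw [hj2, hm', Std.HashMap.size_insert, if_neg hns]; omega

theorem pvLoop_spec (tg : List Int) :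
    ∀ (fuel : Nat) (stack : List (List Int))
      (m : Std.HashMap (List Int) (Option (List Int))),
    PvInv stack m → stack.length + (43046721 - m.size) ≤ fuel →
    PvPost (pvLoop tg fuel stack m) ∧ (pvGood tg → tg ∈ pvLoop tg fuel stack m) := by
  intro fuel
  induction fuel with
  | zero =>
    intro stack m hinv hfuel
    have hsz := pvSize_le m hinv.good
    have hstack : stack = [] := by
      cases stack with
      | nil => rfl
      | cons a t => exfalso; simp only [List.length_cons] at hfuel; omega
    subst hstack
    rw [pvLoop]
    refine ⟨⟨hinv.good, hinv.root, hinv.chain⟩, ?_⟩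
    intro hg
    by_contra h
    rcases hinv.comp tg hg h with ⟨p, hp, _⟩
    simp at hp
  | succ fuel ih =>
    intro stack m hinv hfuel
    have hsz := pvSize_le m hinv.good
    cases stack with
    | nil =>
      rw [pvLoop]
      refine ⟨⟨hinv.good, hinv.root, hinv.chain⟩, ?_⟩
      intro hg
      by_contra h
      rcases hinv.comp tg hg h with ⟨p, hp, _⟩
      simp at hp
    | cons st rest =>
      have hstm : st ∈ m := hinv.mem st (by simp)
      have hstgood : pvGood st := hinv.good st hstm
      rw [pvLoop]
      by_cases hlen : st.length = 8
      · rw [if_pos hlen]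
        by_cases hsttg : st = tg
        · rw [if_pos hsttg]
          exact ⟨⟨hinv.good, hinv.root, hinv.chain⟩, fun _ => hsttg ▸ hstm⟩
        · rw [if_neg hsttg]
          refine ih rest m ⟨(List.nodup_cons.mp hinv.snd).2,
            fun p hp => hinv.mem p (by simp [hp]), hinv.good, hinv.root, hinv.chain,
            fun k hk hkne h => hinv.fresh k hk hkne (by simp [h]), ?_⟩ (by simp at hfuel ⊢; omega)
          intro s hs hsm
          rcases hinv.comp s hs hsm with ⟨p, hp, hpre⟩
          rcases List.mem_cons.mp hp with rfl | hp
          · exfalso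
            have h1 : s.length ≤ 8 := pvGood_length_le s hs
            have h2 : p.length ≤ s.length := hpre.length_le
            have : p = s := hpre.eq_of_length (by omega)
            exact hsm (this ▸ hstm)
          · exact ⟨p, hp, hpre⟩
      · rw [if_neg hlen]
        have hstl : st.length < 8 := by
          have := pvGood_length_le st hstgood; omega
        have hstrest : st ∉ rest := (List.nodup_cons.mp hinv.snd).1
        have hexp := pvExpand_spec tg st hstgood hstl (PySem.List.pyRange 0 8 1) rest m
          (PySem.List.nodup_pyRange_one 0 8)
          (by intro c hc; exact (PySem.List.mem_pyRange_one.mp hc))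
          hstm hstrest
          (List.nodup_cons.mp hinv.snd).2
          (fun p hp => hinv.mem p (by simp [hp]))
          hinv.good hinv.root hinv.chain
          (fun k hk hkne h => hinv.fresh k hk hkne (by simp [h]))
          (by
            intro c hc hcst h
            have := hinv.fresh (st ++ [c]) h (by simp)
            simp at this)
          (by
            intro s hs hsm
            rcases hinv.comp s hs hsm with ⟨p, hp, hpre⟩
            rcases List.mem_cons.mp hp with rfl | hp
            · have hne : p ≠ s := fun he => hsm (he ▸ hstm)
              rcases pvPrefix_step p s hpre hne with ⟨c, hcpre⟩
              have hsub : (p ++ [c]).Sublist s := hcpre.sublist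
              have hnd : (p ++ [c]).Nodup := hs.1.sublist hsub
              have hcs : c ∈ s := hsub.mem (by simp)
              refine Or.inr ⟨c, ?_, ?_, hcpre⟩
              · exact PySem.List.mem_pyRange_one.mpr (hs.2 c hcs)
              · exact (List.nodup_cons.mp ((List.perm_append_singleton c p).nodup_iff.mp hnd)).1
            · exact Or.inl ⟨p, hp, hpre⟩)
        rcases hexp with ⟨hpost, hcase⟩
        rcases hcase with ⟨hnil, htgmem⟩ | ⟨hinv', j, hj1, hj2⟩
        · -- stack cleared: the loop stops on the next test
          rw [hnil]
          cases fuel with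
          | zero => rw [pvLoop]; exact ⟨hpost, fun _ => htgmem⟩
          | succ f => rw [pvLoop]; exact ⟨hpost, fun _ => htgmem⟩
        · have hsz' := pvSize_le _ hinv'.good
          refine ih _ _ hinv' ?_
          rw [hj1, hj2]
          simp at hfuel ⊢
          omega

-- the reconstructed chain: padded rows for tg, tg[:-1], …, []
def pvChainRows (c : List Int) : List (List (Option Int)) :=
  (c.map some ++ List.replicate (8 - c.length) none) ::
    (if h : c = [] then [] else pvChainRows c.dropLast)
termination_by c.length
decreasing_by
  cases c with
  | nil => simp at h
  | cons a t => simp [List.length_dropLast]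

theorem pvBuild_spec (m : Std.HashMap (List Int) (Option (List Int))) (hpost : PvPost m) :
    ∀ (n : Nat) (c : List Int) (f : Nat) (acc : List (List (Option Int))),
      c.length ≤ n → c ∈ m → c.length + 1 ≤ f →
      pvBuild m f (some c) acc = acc ++ pvChainRows c := by
  intro n
  induction n with
  | zero =>
    intro c f acc hlen hc hf
    have hc0 : c = [] := by cases c <;> simp_all
    subst hc0
    cases f with
    | zero => omega
    | succ f =>
      rw [pvBuild]
      rw [hpost.root]
      have hj : (some (none : Option (List Int))).join = none := rfl
      rw [hj, pvChainRows]
      simp [pvBuild]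
  | succ n ih =>
    intro c f acc hlen hc hf
    by_cases hc0 : c = []
    · subst hc0
      cases f with
      | zero => omega
      | succ f =>
        rw [pvBuild]
        rw [hpost.root]
        have hj : (some (none : Option (List Int))).join = none := rfl
        rw [hj, pvChainRows]
        simp [pvBuild]
    · cases f with
      | zero => omega
      | succ f =>
        rcases hpost.chain c hc hc0 with ⟨hget, hmem⟩
        rw [pvBuild]
        rw [hget]
        have hj : (some (some c.dropLast)).join = some c.dropLast := rfl
        rw [hj]
        have hdl : c.dropLast.length = c.length - 1 := by simp
        have h1 : 0 < c.length := List.length_pos_iff.mpr hc0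
        have hstep := ih c.dropLast f (acc ++ [c.map some ++ List.replicate (8 - c.length) none])
          (by omega) hmem (by omega)
        rw [hstep]
        conv_rhs => rw [pvChainRows]
        rw [dif_neg hc0]
        simp

theorem pvChainRows_eq (c : List Int) :
    pvChainRows c = ((List.range (c.length + 1)).map
      (fun k => (c.take k).map some ++ List.replicate (8 - k) none)).reverse := by
  induction hn : c.length using Nat.strong_induction_on generalizing c with
  | _ n ihn =>
    by_cases hc0 : c = []
    · subst hc0
      simp only [List.length_nil] at hn
      subst hn
      rw [pvChainRows]
      simp [List.range_succ]
    · rw [pvChainRows, dif_neg hc0]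
      rw [← hn]
      have h1 : 0 < c.length := List.length_pos_iff.mpr hc0
      have hdl : c.dropLast.length = c.length - 1 := by simp
      rw [ihn (c.length - 1) (by omega) c.dropLast hdl]
      have hn' : c.length - 1 + 1 = c.length := by omega
      rw [hn']
      rw [List.range_succ, List.map_append, List.reverse_append]
      simp only [List.map_cons, List.map_nil, List.reverse_cons, List.reverse_nil,
        List.nil_append, List.cons_append]
      rw [List.take_length]
      congr 2
      apply List.map_congr_left
      intro k hk
      have hkn : k < c.length := List.mem_range.mp hk
      have htake : c.dropLast.take k = c.take k := by
        rw [List.dropLast_eq_take, List.take_take]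
        congr 1
        omega
      rw [htake]

-- Python's len(set(xs)) == len(xs) is exactly Nodup
theorem pvOfList_length_iff (xs : List Int) :
    (PySem.Set.ofList xs).length = xs.length ↔ xs.Nodup := by
  constructor
  · intro h
    have h1 : (PySem.Set.ofList xs).toFinset = xs.toFinset := by
      ext x
      simp [List.mem_toFinset, PySem.Set.mem_ofList]
    have h2 : (PySem.Set.ofList xs).length = xs.toFinset.card := by
      rw [← h1, List.toFinset_card_of_nodup (PySem.Set.nodup_ofList xs)]
    have h3 : xs.toFinset.card = xs.dedup.length := by
      rw [List.card_toFinset]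
    have h4 : xs.dedup.length = xs.length := by omega
    have h5 : xs.dedup = xs := (List.dedup_sublist xs).eq_of_length h4
    rw [← h5]
    exact xs.nodup_dedup
  · intro h
    exact congrArg List.length (PySem.Set.ofList_eq_self_of_nodup xs h)

-- row k of B equals the padded prefix of length k
theorem pvRow_eq (tg : List Int) (k : Nat) (hk : k ≤ tg.length) (hlen : tg.length ≤ 8) :
    (List.range 8).map (fun i => if i < k then tg[i]? else none) =
      (tg.take k).map some ++ List.replicate (8 - k) none := by
  apply List.ext_getElem
  · simp; omega
  · intro j h1 h2
    simp only [List.getElem_map, List.getElem_range]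
    have hj : j < 8 := by simpa using h1
    by_cases hjk : j < k
    · rw [if_pos hjk]
      rw [List.getElem_append_left (by simp; omega)]
      simp only [List.getElem_map]
      rw [List.getElem_take]
      rw [List.getElem?_eq_getElem (by omega)]
    · rw [if_neg hjk]
      rw [List.getElem_append_right (by simp; omega)]
      simp

-- the initial dict {(): None}
theorem pvInit_inv : PvInv [[]] ((Std.HashMap.emptyWithCapacity).insert [] none) := by
  have hroot : ((Std.HashMap.emptyWithCapacity : Std.HashMap (List Int) (Option (List Int))).insert [] none).get? [] = some none := by
    rw [pvGet?_insert, if_pos rfl]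
  have hmem : ∀ k : List Int, k ∈ (Std.HashMap.emptyWithCapacity : Std.HashMap (List Int) (Option (List Int))).insert [] none → k = [] := by
    intro k hk
    rcases Std.HashMap.mem_insert.mp hk with h | h
    · exact (beq_iff_eq.mp h).symm
    · simp at h
  refine ⟨by simp, ?_, ?_, hroot, ?_, ?_, ?_⟩
  · intro p hp
    simp at hp
    subst hp
    exact Std.HashMap.mem_insert_self
  · intro k hk
    rw [hmem k hk]
    exact ⟨by simp, by simp⟩
  · intro k hk hkne
    exact absurd (hmem k hk) hkne
  · intro k hk hkne
    exact absurd (hmem k hk) hkne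
  · intro s _ _
    exact ⟨[], by simp, s.nil_prefix⟩

theorem pvInit_size :
    ((Std.HashMap.emptyWithCapacity : Std.HashMap (List Int) (Option (List Int))).insert [] none).size = 1 := by
  rw [Std.HashMap.size_insert, if_neg (by simp)]
  simp

-- ===== VERDICT (by name: the statement is the Claim_ definition above) =====
theorem dfs_target_spec : Claim_equal_dfs_target := by
  intro tg _
  unfold Spec_dfs_target
  unfold dfs_target
  have hloop := pvLoop_spec tg 50000000 [[]]
    ((Std.HashMap.emptyWithCapacity).insert [] none) pvInit_inv
    (by rw [pvInit_size]; norm_num)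
  set R := pvLoop tg 50000000 [[]] ((Std.HashMap.emptyWithCapacity).insert [] none) with hR
  rcases hloop with ⟨hpost, hcompl⟩
  by_cases hg : pvGood tg
  · -- the reachable case: both return the padded prefixes of tg
    have htgm : tg ∈ R := hcompl hg
    have hlen : tg.length ≤ 8 := pvGood_length_le tg hg
    have hsome : (R.get? tg).isSome = true := by
      rw [Std.HashMap.get?_eq_getElem?]
      exact Std.HashMap.mem_iff_isSome_getElem?.mp htgm
    have hnotnone : (R.get? tg).isNone = false := by
      rcases hv : R.get? tg with _ | v
      · rw [hv] at hsome; simp at hsome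
      · simp
    rw [if_neg (by simp; exact htgm)]
    rw [pvBuild_spec R hpost tg.length tg (tg.length + 2) [] le_rfl htgm (by omega)]
    rw [List.nil_append, pvChainRows_eq, List.reverse_reverse]
    unfold dfs_target_alt
    rw [if_neg]
    · apply List.map_congr_left
      intro k hk
      have hkle : k ≤ tg.length := by
        have := List.mem_range.mp hk; omega
      exact (pvRow_eq tg k hkle hlen).symm
    · exact fun h => h.elim (fun h1 => h1 ((pvOfList_length_iff tg).mpr hg.1))
        (fun h2 => h2 hg.2)
  · -- the unreachable case: both return []
    have htgm : ¬ tg ∈ R := fun h => hg (hpost.good tg h)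
    have hnone : (R.get? tg).isNone = true := by
      rw [Std.HashMap.get?_eq_getElem?, Std.HashMap.getElem?_eq_none htgm]
      rfl
    rw [if_pos hnone]
    unfold dfs_target_alt
    rw [if_pos]
    by_cases hnd : tg.Nodup
    · exact Or.inr (fun hall => hg ⟨hnd, hall⟩)
    · exact Or.inl (fun he => hnd ((pvOfList_length_iff tg).mp he))
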